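-- pv_equiv track=rewrite | github.com/SophonMe/AIContext | aicontext/viewer.py | _split_pipe_row
-- ===== SOURCE A (Python) =====
-- def _split_pipe_row(line):
--     """Split a pipe-separated row respecting \\| escapes."""
--     inner = line.strip()
--     if inner.startswith('|'):
--         inner = inner[1:]
--     if inner.endswith('|'):
--         inner = inner[:-1]
--
--     placeholder = '\x00'
--     inner = inner.replace('\\\\', '\x01')
--     inner = inner.replace('\\|', placeholder)
--     parts = inner.split('|')
--     cells = []
--     for p in parts:
--         p = p.strip()
--         p = p.replace(placeholder, '|')
--         p = p.replace('\\n', '\n')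
--         p = p.replace('\x01', '\\')
--         cells.append(p)
--     return cells
-- ===== SOURCE B (Python) =====
-- def _split_pipe_row(line):
--     """Split a pipe-separated row respecting \\| escapes."""
--     inner = line.strip()
--     if inner.startswith('|'):
--         inner = inner[1:]
--     if inner.endswith('|'):
--         inner = inner[:-1]
--
--     cells = []
--     cur = []
--     escaped = False
--     for ch in inner:
--         if escaped:
--             cur.append(ch)
--             escaped = False
--         elif ch == '\\':
--             cur.append(ch)
--             escaped = True
--         elif ch == '|':
--             cells.append(''.join(cur))
--             cur = []
--         else:
--             cur.append(ch)
--     cells.append(''.join(cur))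
--
--     out = []
--     for cell in cells:
--         cell = cell.strip()
--         buf = []
--         pending = False
--         for ch in cell:
--             if pending:
--                 if ch == '\\' or ch == '|':
--                     buf.append(ch)
--                 elif ch == 'n':
--                     buf.append('\n')
--                 else:
--                     buf.append('\\')
--                     buf.append(ch)
--                 pending = False
--             elif ch == '\\':
--                 pending = True
--             else:
--                 buf.append(ch)
--         if pending:
--             buf.append('\\')
--         out.append(''.join(buf))
--     return out
-- ===== Notes on version B (the rewrite author's own statement) =====
-- stated objective: idiomatic
-- what changed: Replaces A's sentinel-character trick (replace '\\' and '\|' by placeholder bytes, str.split on '|', then three per-cell replaces to undo the placeholders) by a direct escape-aware character scan that splits into raw cells, followed by a per-cell strip and a single-pass unescape; no placeholder characters are ever introduced.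
import Mathlib
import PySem

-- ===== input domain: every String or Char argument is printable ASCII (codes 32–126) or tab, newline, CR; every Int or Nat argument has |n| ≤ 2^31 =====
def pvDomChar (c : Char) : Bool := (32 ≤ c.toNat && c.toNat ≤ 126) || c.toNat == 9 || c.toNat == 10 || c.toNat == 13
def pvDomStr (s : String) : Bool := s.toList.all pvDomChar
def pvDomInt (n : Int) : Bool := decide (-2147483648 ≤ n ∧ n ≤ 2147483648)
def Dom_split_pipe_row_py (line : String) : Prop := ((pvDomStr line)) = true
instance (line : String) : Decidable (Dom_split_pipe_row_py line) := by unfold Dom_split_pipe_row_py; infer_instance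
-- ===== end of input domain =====

-- B replaces A's placeholder/replace/split trick by one explicit escape-aware character scan
-- plus a per-cell single-pass unescape (objective: alternative — same cost, no sentinel characters).

-- ===== PORT A =====
-- literal transliteration of Source A's _split_pipe_row
def split_pipe_row_py (line : String) : List String :=
  let inner := PySem.Str.strip line
  let inner := if PySem.Str.startswith inner "|" then PySem.Str.slice inner (some 1) none else inner
  let inner := if PySem.Str.endswith inner "|" then PySem.Str.slice inner none (some (-1)) else inner
  let inner := PySem.Str.replace inner "\\\\" "\x01"
  let inner := PySem.Str.replace inner "\\|" "\x00"
  -- '|' is a nonempty separator, so Python's split never fails; getD is never taken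
  let parts := (PySem.Str.split? inner "|").getD []
  parts.foldl (fun cells p =>
    let p := PySem.Str.strip p
    let p := PySem.Str.replace p "\x00" "|"
    let p := PySem.Str.replace p "\\n" "\n"
    let p := PySem.Str.replace p "\x01" "\\"
    cells ++ [p]) []

-- ===== PORT B =====
-- literal transliteration of Source B: escape-aware scan into raw cells, then strip + one-pass unescape
def split_pipe_row_py_alt (line : String) : List String :=
  let inner := PySem.Str.strip line
  let inner := if PySem.Str.startswith inner "|" then PySem.Str.slice inner (some 1) none else inner
  let inner := if PySem.Str.endswith inner "|" then PySem.Str.slice inner none (some (-1)) else inner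
  let st := inner.toList.foldl (fun (s : List String × List Char × Bool) ch =>
    if s.2.2 then (s.1, s.2.1 ++ [ch], false)
    else if ch = '\\' then (s.1, s.2.1 ++ [ch], true)
    else if ch = '|' then (s.1 ++ [String.ofList s.2.1], [], false)
    else (s.1, s.2.1 ++ [ch], false)) ([], [], false)
  let cells := st.1 ++ [String.ofList st.2.1]
  cells.foldl (fun out cell =>
    let r := (PySem.Str.strip cell).toList.foldl (fun (s : List Char × Bool) ch =>
      if s.2 then
        (if ch = '\\' ∨ ch = '|' then s.1 ++ [ch]
         else if ch = 'n' then s.1 ++ ['\n']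
         else s.1 ++ ['\\', ch], false)
      else if ch = '\\' then (s.1, true)
      else (s.1 ++ [ch], false)) ([], false)
    let buf := if r.2 then r.1 ++ ['\\'] else r.1
    out ++ [String.ofList buf]) []

-- ===== PRECONDITION & SPEC =====
def Spec_split_pipe_row_py (line : String) (out : List String) : Prop := out = split_pipe_row_py_alt line
instance (line : String) (out : List String) : Decidable (Spec_split_pipe_row_py line out) := by unfold Spec_split_pipe_row_py; infer_instance

-- ===== CLAIM (what is proved, stated in full; the proofs are below) =====
def Claim_equal_split_pipe_row_py : Prop := ∀ (line : String), Dom_split_pipe_row_py line → Spec_split_pipe_row_py line (split_pipe_row_py line)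

-- ===== LEMMAS AND PROOFS =====

-- Specification-style (fuel-free) versions of PySem.Chars.replace / splitOn used by the proof.
def pvRepl (old new : List Char) : List Char → List Char
  | [] => []
  | c :: t =>
    if old ≠ [] ∧ old.isPrefixOf (c :: t) then new ++ pvRepl old new (t.drop (old.length - 1))
    else c :: pvRepl old new t
termination_by s => s.length
decreasing_by
  · simp only [List.length_drop, List.length_cons]; omega
  · simp

def pvConsHead (x : List Char) : List (List Char) → List (List Char)
  | [] => [x]
  | h :: r => (x ++ h) :: r

def pvSplitSp : List Char → List (List Char)
  | [] => [[]]
  | c :: t => if c = '|' then [] :: pvSplitSp t else pvConsHead [c] (pvSplitSp t)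

-- one-backslash-pending encoder: the combined effect of A's two encoding replaces
def pvEnc : Bool → List Char → List Char
  | false, [] => []
  | false, c :: t => if c = '\\' then pvEnc true t else c :: pvEnc false t
  | true, [] => ['\\']
  | true, c :: t =>
    if c = '\\' then '\x01' :: pvEnc false t
    else if c = '|' then '\x00' :: pvEnc false t
    else '\\' :: c :: pvEnc false t

-- the BB→X1 stage alone
def pvE1 : Bool → List Char → List Char
  | false, [] => []
  | false, c :: t => if c = '\\' then pvE1 true t else c :: pvE1 false t
  | true, [] => ['\\']
  | true, c :: t => if c = '\\' then '\x01' :: pvE1 false t else '\\' :: c :: pvE1 false t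

-- B's scanner and decoder, in state-passing form
def pvScan : Bool → List Char → List (List Char)
  | _, [] => [[]]
  | true, c :: t => pvConsHead [c] (pvScan false t)
  | false, c :: t =>
    if c = '\\' then pvConsHead [c] (pvScan true t)
    else if c = '|' then [] :: pvScan false t
    else pvConsHead [c] (pvScan false t)

def pvDec : Bool → List Char → List Char
  | false, [] => []
  | false, c :: t => if c = '\\' then pvDec true t else c :: pvDec false t
  | true, [] => ['\\']
  | true, c :: t =>
    (if c = '\\' ∨ c = '|' then [c] else if c = 'n' then ['\n'] else ['\\', c]) ++ pvDec false t

-- A's per-cell decode chain, at the Chars level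
def pvDecA (q : List Char) : List Char :=
  pvRepl ['\x01'] ['\\'] (pvRepl ['\\', 'n'] ['\n'] (pvRepl ['\x00'] ['|'] q))


-- basic facts
theorem pvConsHead_consHead (a b : List Char) (l : List (List Char)) :
    pvConsHead a (pvConsHead b l) = pvConsHead (a ++ b) l := by
  cases l <;> simp [pvConsHead]

theorem pvSplitSp_ne_nil (s : List Char) : pvSplitSp s ≠ [] := by
  cases s with
  | nil => simp [pvSplitSp]
  | cons c t =>
    simp only [pvSplitSp]
    split
    · simp
    · cases h : pvSplitSp t <;> simp [pvConsHead]

theorem pvScan_ne_nil (b : Bool) (s : List Char) : pvScan b s ≠ [] := by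
  cases s with
  | nil => cases b <;> simp [pvScan]
  | cons c t =>
    cases b <;> simp only [pvScan]
    · split
      · cases h : pvScan true t <;> simp [pvConsHead]
      · split
        · simp
        · cases h : pvScan false t <;> simp [pvConsHead]
    · cases h : pvScan false t <;> simp [pvConsHead]

-- === PySem.Chars.replace equals pvRepl ===
theorem replGo (old new : List Char) (hold : old ≠ []) :
    ∀ (fuel : Nat) (l acc : List Char), l.length ≤ fuel →
      PySem.Chars.replace.go old new fuel l acc = acc.reverse ++ pvRepl old new l := by
  intro fuel
  induction fuel with
  | zero =>
    intro l acc h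
    have : l = [] := by cases l <;> simp_all
    subst this
    rw [PySem.Chars.replace.go.eq_def]
    simp [pvRepl]
  | succ n ih =>
    intro l acc h
    cases l with
    | nil => rw [PySem.Chars.replace.go.eq_def]; simp [pvRepl]
    | cons c t =>
      rw [PySem.Chars.replace.go.eq_def]
      dsimp only
      by_cases hp : old.isPrefixOf (c :: t) = true
      · rw [if_pos hp]
        have hlen : old.length ≤ (c :: t).length := List.IsPrefix.length_le (List.isPrefixOf_iff_prefix.mp hp)
        have h1 : ((c :: t).drop old.length).length ≤ n := by
          simp only [List.length_drop] at *
          have : 1 ≤ old.length := by cases old <;> simp_all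
          simp at h hlen ⊢
          omega
        rw [ih _ _ h1]
        have : (c :: t).drop old.length = t.drop (old.length - 1) := by
          cases old with
          | nil => simp_all
          | cons o os => simp
        rw [this]
        conv_rhs => rw [pvRepl]
        simp [hold, hp]
      · rw [if_neg hp]
        rw [ih t (c :: acc) (by simp at h ⊢; omega)]
        conv_rhs => rw [pvRepl]
        simp [hp]

theorem replace_eq_pvRepl (s old new : List Char) (hold : old ≠ []) :
    PySem.Chars.replace s old new = pvRepl old new s := by
  unfold PySem.Chars.replace
  have : old.isEmpty = false := by cases old <;> simp_all
  rw [if_neg (by simp [this])]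
  simpa using replGo old new hold s.length s [] le_rfl

-- === PySem.Chars.splitOn ['|'] equals pvSplitSp ===
theorem splitGo : ∀ (fuel : Nat) (l cur : List Char) (acc : List (List Char)), l.length < fuel →
    PySem.Chars.splitOn.go ['|'] fuel l cur acc
      = acc.reverse ++ pvConsHead cur.reverse (pvSplitSp l) := by
  intro fuel
  induction fuel with
  | zero => intro l cur acc h; omega
  | succ n ih =>
    intro l cur acc h
    cases l with
    | nil =>
      rw [PySem.Chars.splitOn.go.eq_def]
      simp [pvSplitSp, pvConsHead]
    | cons c t =>
      rw [PySem.Chars.splitOn.go.eq_def]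
      by_cases hc : c = '|'
      · subst hc
        have hp : List.isPrefixOf ['|'] ('|' :: t) = true := by simp [List.isPrefixOf]
        simp only [hp, if_pos]
        have ht : t.length < n := by simp at h; omega
        rw [ih _ _ _ (by simpa using ht)]
        have hne := pvSplitSp_ne_nil t
        cases hsp : pvSplitSp t with
        | nil => exact absurd hsp hne
        | cons h' r' => simp [pvSplitSp, pvConsHead, hsp]
      · have hp : List.isPrefixOf ['|'] (c :: t) = false := by
          simp [List.isPrefixOf]; exact fun hh => absurd hh.symm hc
        simp only [hp, Bool.false_eq_true, if_neg, not_false_iff]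
        rw [ih t (c :: cur) acc (by simp at h ⊢; omega)]
        have : pvSplitSp (c :: t) = pvConsHead [c] (pvSplitSp t) := by
          simp [pvSplitSp, hc]
        rw [this, List.reverse_cons, ← pvConsHead_consHead]
  
theorem splitOn_eq_pvSplitSp (s : List Char) :
    PySem.Chars.splitOn s ['|'] = pvSplitSp s := by
  unfold PySem.Chars.splitOn
  rw [splitGo (s.length + 1) s [] [] (by omega)]
  have hne := pvSplitSp_ne_nil s
  cases hsp : pvSplitSp s with
  | nil => exact absurd hsp hne
  | cons h r => simp [pvConsHead]

-- pvRepl cons-step rewrites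
theorem pvRepl_nil (o n : List Char) : pvRepl o n [] = [] := by simp [pvRepl]

theorem pvRepl_match1 (a x : Char) (t : List Char) :
    pvRepl [a] [x] (a :: t) = x :: pvRepl [a] [x] t := by
  rw [pvRepl]; simp [List.isPrefixOf]

theorem pvRepl_miss1 {a c : Char} (x : Char) (t : List Char) (h : c ≠ a) :
    pvRepl [a] [x] (c :: t) = c :: pvRepl [a] [x] t := by
  rw [pvRepl]; simp [List.isPrefixOf, Ne.symm h]

theorem pvRepl_match2 (a b x : Char) (t : List Char) :
    pvRepl [a, b] [x] (a :: b :: t) = x :: pvRepl [a, b] [x] t := by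
  rw [pvRepl]; simp [List.isPrefixOf]

theorem pvRepl_miss2_head {a c : Char} (b x : Char) (t : List Char) (h : c ≠ a) :
    pvRepl [a, b] [x] (c :: t) = c :: pvRepl [a, b] [x] t := by
  rw [pvRepl]; simp [List.isPrefixOf, Ne.symm h]

theorem pvRepl_miss2_snd {b d : Char} (a x : Char) (t : List Char) (h : d ≠ b) :
    pvRepl [a, b] [x] (a :: d :: t) = a :: pvRepl [a, b] [x] (d :: t) := by
  rw [pvRepl]; simp [List.isPrefixOf, Ne.symm h]

theorem pvRepl_single2 (a b x c : Char) : pvRepl [a, b] [x] [c] = [c] := by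
  rw [pvRepl]; simp [List.isPrefixOf, pvRepl]

-- === stage 1: the two encoding replaces equal pvEnc ===
theorem L1a (cs : List Char) :
    pvRepl ['\\', '\\'] ['\x01'] cs = pvE1 false cs ∧
    pvRepl ['\\', '\\'] ['\x01'] ('\\' :: cs) = pvE1 true cs := by
  induction cs with
  | nil =>
    constructor
    · simp [pvRepl, pvE1]
    · simp [pvRepl_single2, pvE1]
  | cons c t ih =>
    constructor
    · by_cases hc : c = '\\'
      · subst hc; simpa [pvE1] using ih.2
      · rw [pvRepl_miss2_head _ _ _ hc]
        simp [pvE1, hc, ih.1]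
    · by_cases hc : c = '\\'
      · subst hc
        rw [pvRepl_match2]
        simp [pvE1, ih.1]
      · rw [pvRepl_miss2_snd _ _ _ hc, pvRepl_miss2_head _ _ _ hc]
        simp [pvE1, hc, ih.1]

theorem L1b (cs : List Char) :
    pvRepl ['\\', '|'] ['\x00'] (pvE1 false cs) = pvEnc false cs ∧
    pvRepl ['\\', '|'] ['\x00'] (pvE1 true cs) = pvEnc true cs := by
  induction cs with
  | nil =>
    constructor
    · simp [pvRepl, pvE1, pvEnc]
    · simp [pvE1, pvRepl_single2, pvEnc]
  | cons c t ih =>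
    constructor
    · by_cases hc : c = '\\'
      · subst hc; simpa [pvE1, pvEnc] using ih.2
      · simp only [pvE1, if_neg hc]
        rw [pvRepl_miss2_head _ _ _ hc]
        simp [pvEnc, hc, ih.1]
    · by_cases hc : c = '\\'
      · subst hc
        have he : pvE1 true ('\\' :: t) = '\x01' :: pvE1 false t := by simp [pvE1]
        rw [he, pvRepl_miss2_head _ _ _ (by decide : ('\x01' : Char) ≠ '\\')]
        simp [pvEnc, ih.1]
      · by_cases hp : c = '|'
        · subst hp
          simp only [pvE1, pvEnc, if_neg (by decide : ('|' : Char) ≠ '\\'), if_pos rfl]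
          rw [pvRepl_match2]
          simp [ih.1]
        · simp only [pvE1, if_neg hc]
          rw [pvRepl_miss2_snd _ _ _ hp, pvRepl_miss2_head _ _ _ hc]
          simp [pvEnc, hc, hp, ih.1]

-- === stage 2: splitting the encoded string = mapping pvEnc over the raw scan ===
theorem L2 (cs : List Char) :
    pvSplitSp (pvEnc false cs) = (pvScan false cs).map (pvEnc false) ∧
    pvSplitSp (pvEnc true cs) = (pvConsHead ['\\'] (pvScan true cs)).map (pvEnc false) := by
  induction cs with
  | nil =>
    constructor
    · simp [pvEnc, pvSplitSp, pvScan]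
    · simp [pvEnc, pvScan, pvConsHead, pvSplitSp]
  | cons c t ih =>
    have hscan := pvScan_ne_nil false t
    constructor
    · by_cases hc : c = '\\'
      · subst hc
        simp only [pvEnc, pvScan, reduceIte]
        exact ih.2
      · by_cases hp : c = '|'
        · subst hp
          simp only [pvEnc, pvScan, pvSplitSp, if_neg hc, reduceIte, List.map_cons]
          rw [ih.1]
        · simp only [pvEnc, pvScan, if_neg hc, if_neg hp, pvSplitSp]
          rw [ih.1]
          cases hs : pvScan false t with
          | nil => exact absurd hs hscan
          | cons h r => simp [pvConsHead, pvSplitSp, hp, pvEnc, hc]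
    · -- pvEnc true (c :: t)
      by_cases hc : c = '\\'
      · subst hc
        simp only [pvEnc, pvScan, pvSplitSp, reduceIte]
        rw [ih.1, pvConsHead_consHead]
        cases hs2 : pvScan false t with
        | nil => exact absurd hs2 hscan
        | cons h2 r2 =>
          cases hst : pvScan true t with
          | nil => exact absurd hst (pvScan_ne_nil true t)
          | cons h r =>
            rw [hst] at *
            simp_all [pvConsHead, pvEnc]
      · by_cases hp : c = '|'
        · subst hp
          simp only [pvEnc, pvScan, pvSplitSp, if_neg hc, reduceIte]
          rw [ih.1]
          cases hs : pvScan false t with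
          | nil => exact absurd hs hscan
          | cons h r =>
            rw [pvConsHead_consHead]
            simp [pvConsHead, pvEnc]
        · simp only [pvEnc, pvScan, pvSplitSp, if_neg hc, if_neg hp, reduceIte]
          rw [ih.1]
          cases hs : pvScan false t with
          | nil => exact absurd hs hscan
          | cons h r =>
            rw [pvConsHead_consHead, pvConsHead_consHead]
            simp [pvConsHead, pvEnc, hc, hp]

-- === stage 3: strip commutes with pvEnc ===
theorem enc_ws (ws : List Char) (h : ∀ c ∈ ws, PySem.Chars.isspace c = true) :
    pvEnc false ws = ws := by
  induction ws with
  | nil => simp [pvEnc]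
  | cons c t ih =>
    have hc : c ≠ '\\' := by
      intro he; subst he
      have := h _ (List.mem_cons_self ..)
      simp [PySem.Chars.isspace] at this
    simp only [pvEnc, if_neg hc]
    rw [ih (fun x hx => h x (List.mem_cons_of_mem _ hx))]

theorem enc_append_ws (cs ws : List Char) (h : ∀ c ∈ ws, PySem.Chars.isspace c = true) :
    ∀ b, pvEnc b (cs ++ ws) = pvEnc b cs ++ ws := by
  induction cs with
  | nil =>
    intro b
    cases b with
    | false => simpa [pvEnc] using enc_ws ws h
    | true =>
      cases ws with
      | nil => simp [pvEnc]
      | cons w t =>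
        have hw : w ≠ '\\' := by
          intro he; subst he
          have := h _ (List.mem_cons_self ..)
          simp [PySem.Chars.isspace] at this
        have hp : w ≠ '|' := by
          intro he; subst he
          have := h _ (List.mem_cons_self ..)
          simp [PySem.Chars.isspace] at this
        simp only [List.nil_append, pvEnc, if_neg hw, if_neg hp]
        rw [enc_ws t (fun x hx => h x (List.mem_cons_of_mem _ hx))]
        simp [pvEnc]
  | cons c t ih =>
    intro b
    cases b with
    | false =>
      by_cases hc : c = '\\'
      · subst hc; simp only [List.cons_append, pvEnc, reduceIte]; exact ih true
      · simp only [List.cons_append, pvEnc, if_neg hc]; rw [ih false]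
    | true =>
      by_cases hc : c = '\\'
      · subst hc; simp only [List.cons_append, pvEnc, reduceIte]; rw [ih false]
      · by_cases hp : c = '|'
        · subst hp; simp only [List.cons_append, pvEnc, if_neg (by decide : ('|':Char) ≠ '\\'), reduceIte]; rw [ih false]
        · simp only [List.cons_append, pvEnc, if_neg hc, if_neg hp]; rw [ih false]

theorem lstrip_enc_true (t : List Char) :
    PySem.Chars.lstrip (pvEnc true t) = pvEnc true t := by
  cases t with
  | nil => simp [pvEnc, PySem.Chars.lstrip]; decide
  | cons c t' =>
    simp only [pvEnc]
    split
    · simp [PySem.Chars.lstrip]; decide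
    · split
      · simp [PySem.Chars.lstrip]; decide
      · simp [PySem.Chars.lstrip]; decide

theorem lstrip_enc (cs : List Char) :
    PySem.Chars.lstrip (pvEnc false cs) = pvEnc false (PySem.Chars.lstrip cs) := by
  induction cs with
  | nil => simp [pvEnc, PySem.Chars.lstrip]
  | cons c t ih =>
    by_cases hws : PySem.Chars.isspace c = true
    · have hc : c ≠ '\\' := by
        intro he; subst he; simp [PySem.Chars.isspace] at hws
      simp only [pvEnc, if_neg hc, PySem.Chars.lstrip, List.dropWhile_cons, hws, if_pos]
      simpa [PySem.Chars.lstrip] using ih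
    · have h1 : PySem.Chars.lstrip (c :: t) = c :: t := by
        simp [PySem.Chars.lstrip, List.dropWhile_cons, hws]
      rw [h1]
      by_cases hc : c = '\\'
      · subst hc
        simp only [pvEnc, if_pos rfl]
        exact lstrip_enc_true t
      · simp [pvEnc, hc, PySem.Chars.lstrip, List.dropWhile_cons, hws]

theorem enc_false_nil_iff (t : List Char) : pvEnc false t = [] ↔ t = [] := by
  cases t with
  | nil => simp [pvEnc]
  | cons c t' =>
    simp only [pvEnc]
    constructor
    · intro h
      split at h
      · exact absurd h (by cases t' with
          | nil => simp [pvEnc]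
          | cons d t'' =>
            simp only [pvEnc]
            split
            · simp
            · split <;> simp)
      · simp at h
    · intro h; simp at h

theorem pv_getLast?_cons {c : Char} {l : List Char} (h : l ≠ []) :
    (c :: l).getLast? = l.getLast? := by
  cases l with
  | nil => simp at h
  | cons d t => rw [List.getLast?_cons_cons]

theorem enc_getLast_nonws (u : List Char)
    (h : ∀ x, u.getLast? = some x → PySem.Chars.isspace x = false) :
    ∀ b x, (pvEnc b u).getLast? = some x → PySem.Chars.isspace x = false := by
  induction u with
  | nil =>
    intro b x hx
    cases b with
    | false => simp [pvEnc] at hx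
    | true => simp [pvEnc] at hx; subst hx; decide
  | cons c t ih =>
    have hlast : ∀ x, t.getLast? = some x → PySem.Chars.isspace x = false := by
      intro x hx
      apply h
      cases t with
      | nil => simp at hx
      | cons d t' => rw [List.getLast?_cons_cons]; exact hx
    have hc0 : t = [] → PySem.Chars.isspace c = false := by
      intro he; subst he
      exact h c (by simp)
    intro b x hx
    by_cases ht : t = []
    · subst ht
      have hc := hc0 rfl
      cases b with
      | false =>
        simp only [pvEnc] at hx
        split at hx
        · next hcb =>
          subst hcb
          simp [pvEnc] at hx; subst hx; decide
        · simp [pvEnc] at hx; subst hx; exact hc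
      | true =>
        simp only [pvEnc] at hx
        split at hx
        · simp [pvEnc] at hx; subst hx; decide
        · split at hx
          · simp [pvEnc] at hx; subst hx; decide
          · simp [pvEnc] at hx
            subst hx; exact hc
    · -- t ≠ [], so pvEnc _ t ≠ [] in the relevant cases and the last element comes from the tail
      cases b with
      | false =>
        simp only [pvEnc] at hx
        split at hx
        · exact ih hlast true x hx
        · rw [pv_getLast?_cons (by rw [ne_eq, enc_false_nil_iff]; exact ht)] at hx
          exact ih hlast false x hx
      | true =>
        simp only [pvEnc] at hx
        split at hx
        · rw [pv_getLast?_cons (by rw [ne_eq, enc_false_nil_iff]; exact ht)] at hx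
          exact ih hlast false x hx
        · split at hx
          · rw [pv_getLast?_cons (by rw [ne_eq, enc_false_nil_iff]; exact ht)] at hx
            exact ih hlast false x hx
          · rw [pv_getLast?_cons (by simp),
               pv_getLast?_cons (by rw [ne_eq, enc_false_nil_iff]; exact ht)] at hx
            exact ih hlast false x hx

theorem head?_dropWhile {p : Char → Bool} {l : List Char} {x : Char}
    (h : (List.dropWhile p l).head? = some x) : p x = false := by
  induction l with
  | nil => simp at h
  | cons c t ih =>
    rw [List.dropWhile_cons] at h
    split at h
    · exact ih h
    · simp at h
      subst h
      simp_all

theorem rstrip_fix (l : List Char)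
    (h : ∀ x, l.getLast? = some x → PySem.Chars.isspace x = false) :
    PySem.Chars.rstrip l = l := by
  unfold PySem.Chars.rstrip
  cases hr : l.reverse with
  | nil =>
    have hl : l = [] := by simpa using congrArg List.reverse hr
    simp [hl]
  | cons a t =>
    have ha : l.getLast? = some a := by
      rw [← List.head?_reverse, hr]; rfl
    have hws2 := h a ha
    have hd : List.dropWhile PySem.Chars.isspace (a :: t) = a :: t := by
      rw [List.dropWhile_cons, hws2]; simp
    rw [hd, ← hr, List.reverse_reverse]

theorem rstrip_append_ws (l w : List Char) (h : ∀ c ∈ w, PySem.Chars.isspace c = true) :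
    PySem.Chars.rstrip (l ++ w) = PySem.Chars.rstrip l := by
  unfold PySem.Chars.rstrip
  rw [List.reverse_append, List.dropWhile_append]
  have : List.dropWhile PySem.Chars.isspace w.reverse = [] := by
    rw [List.dropWhile_eq_nil_iff]
    intro x hx
    exact h x (by simpa using hx)
  simp [this]

theorem rstrip_enc (q : List Char) :
    PySem.Chars.rstrip (pvEnc false q) = pvEnc false (PySem.Chars.rstrip q) := by
  have hdecomp : q = PySem.Chars.rstrip q ++ (List.takeWhile PySem.Chars.isspace q.reverse).reverse := by
    unfold PySem.Chars.rstrip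
    conv_lhs => rw [← List.reverse_reverse q,
      ← List.takeWhile_append_dropWhile (p := PySem.Chars.isspace) (l := q.reverse)]
    rw [List.reverse_append]
  have hws : ∀ c ∈ (List.takeWhile PySem.Chars.isspace q.reverse).reverse, PySem.Chars.isspace c = true := by
    intro c hc
    exact List.mem_takeWhile_imp (by simpa using hc)
  have hlast : ∀ x, (PySem.Chars.rstrip q).getLast? = some x → PySem.Chars.isspace x = false := by
    intro x hx
    unfold PySem.Chars.rstrip at hx
    rw [← List.head?_reverse] at hx
    simp only [List.reverse_reverse] at hx
    exact head?_dropWhile hx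
  conv_lhs => rw [hdecomp]
  rw [enc_append_ws _ _ hws, rstrip_append_ws _ _ hws]
  exact rstrip_fix _ (enc_getLast_nonws _ hlast false)

theorem strip_enc (p : List Char) :
    PySem.Chars.strip (pvEnc false p) = pvEnc false (PySem.Chars.strip p) := by
  unfold PySem.Chars.strip
  rw [lstrip_enc, rstrip_enc]

-- === stage 4: A's decode chain on the encoded cell = B's one-pass decode on the raw cell ===
theorem L4 (p : List Char) (h0 : '\x00' ∉ p) (h1 : '\x01' ∉ p) :
    pvDecA (pvEnc false p) = pvDec false p ∧ pvDecA (pvEnc true p) = pvDec true p := by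
  induction p with
  | nil =>
    constructor
    · simp [pvDecA, pvEnc, pvDec, pvRepl_nil]
    · simp only [pvDecA, pvEnc, pvDec]
      rw [pvRepl_miss1 _ _ (by decide), pvRepl_nil]
      rw [pvRepl_single2]
      rw [pvRepl_miss1 _ _ (by decide), pvRepl_nil]
  | cons c t ih =>
    have hc0 : c ≠ '\x00' := fun he => h0 (he ▸ List.mem_cons_self ..)
    have hc1 : c ≠ '\x01' := fun he => h1 (he ▸ List.mem_cons_self ..)
    have iht := ih (fun hm => h0 (List.mem_cons_of_mem _ hm)) (fun hm => h1 (List.mem_cons_of_mem _ hm))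
    constructor
    · by_cases hc : c = '\\'
      · subst hc
        simp only [pvEnc, pvDec, reduceIte]
        exact iht.2
      · simp only [pvEnc, pvDec, if_neg hc, pvDecA]
        rw [pvRepl_miss1 _ _ hc0, pvRepl_miss2_head _ _ _ hc, pvRepl_miss1 _ _ hc1]
        simpa [pvDecA] using congrArg (List.cons c) iht.1
    · by_cases hc : c = '\\'
      · subst hc
        simp only [pvEnc, pvDec, reduceIte, true_or, pvDecA, List.singleton_append]
        rw [pvRepl_miss1 _ _ (by decide : ('\x01':Char) ≠ '\x00'),
            pvRepl_miss2_head _ _ _ (by decide : ('\x01':Char) ≠ '\\'),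
            pvRepl_match1]
        simpa [pvDecA] using congrArg (List.cons '\\') iht.1
      · by_cases hp : c = '|'
        · subst hp
          simp only [pvEnc, pvDec, if_neg hc, reduceIte, or_true, pvDecA, List.singleton_append]
          rw [pvRepl_match1,
              pvRepl_miss2_head _ _ _ (by decide : ('|':Char) ≠ '\\'),
              pvRepl_miss1 _ _ (by decide : ('|':Char) ≠ '\x01')]
          simpa [pvDecA] using congrArg (List.cons '|') iht.1
        · by_cases hn : c = 'n'
          · subst hn
            simp only [pvEnc, pvDec, if_neg hc, if_neg hp, reduceIte, pvDecA, List.singleton_append]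
            rw [pvRepl_miss1 _ _ (by decide : ('\\':Char) ≠ '\x00'),
                pvRepl_miss1 _ _ (by decide : ('n':Char) ≠ '\x00'),
                pvRepl_match2,
                pvRepl_miss1 _ _ (by decide : ('\n':Char) ≠ '\x01')]
            simpa [pvDecA] using congrArg (List.cons '\n') iht.1
          · simp only [pvEnc, pvDec, if_neg hc, if_neg hp, if_neg hn, pvDecA,
              if_neg (by simp [hc, hp] : ¬(c = '\\' ∨ c = '|'))]
            rw [pvRepl_miss1 _ _ (by decide : ('\\':Char) ≠ '\x00'),
                pvRepl_miss1 _ _ hc0,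
                pvRepl_miss2_snd _ _ _ hn,
                pvRepl_miss2_head _ _ _ hc,
                pvRepl_miss1 _ _ (by decide : ('\\':Char) ≠ '\x01'),
                pvRepl_miss1 _ _ hc1]
            have hh := iht.1
            simp only [pvDecA] at hh
            simp [hh]

-- === characterizing the two foldl loops of port B ===
-- named copies of port B's two loop bodies (definitionally equal to the lambdas in the port)
def pvStepScan (s : List String × List Char × Bool) (ch : Char) : List String × List Char × Bool :=
  if s.2.2 then (s.1, s.2.1 ++ [ch], false)
  else if ch = '\\' then (s.1, s.2.1 ++ [ch], true)
  else if ch = '|' then (s.1 ++ [String.ofList s.2.1], [], false)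
  else (s.1, s.2.1 ++ [ch], false)

def pvStepDec (s : List Char × Bool) (ch : Char) : List Char × Bool :=
  if s.2 then
    (if ch = '\\' ∨ ch = '|' then s.1 ++ [ch]
     else if ch = 'n' then s.1 ++ ['\n']
     else s.1 ++ ['\\', ch], false)
  else if ch = '\\' then (s.1, true)
  else (s.1 ++ [ch], false)

theorem scan_foldl (cs : List Char) : ∀ (esc : Bool) (cells : List String) (cur : List Char),
    ((cs.foldl pvStepScan (cells, cur, esc)).1
      ++ [String.ofList (cs.foldl pvStepScan (cells, cur, esc)).2.1])
    = cells ++ (pvConsHead cur (pvScan esc cs)).map String.ofList := by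
  induction cs with
  | nil =>
    intro esc cells cur
    cases esc <;> simp [pvScan, pvConsHead]
  | cons c t ih =>
    intro esc cells cur
    cases esc with
    | true =>
      have step : List.foldl pvStepScan (cells, cur, true) (c :: t)
          = List.foldl pvStepScan (cells, cur ++ [c], false) t := by
        simp [pvStepScan]
      rw [step, ih false cells (cur ++ [c])]
      have hq : pvScan true (c :: t) = pvConsHead [c] (pvScan false t) := by simp [pvScan]
      rw [hq, pvConsHead_consHead]
    | false =>
      by_cases hc : c = '\\'
      · subst hc
        have step : List.foldl pvStepScan (cells, cur, false) ('\\' :: t)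
            = List.foldl pvStepScan (cells, cur ++ ['\\'], true) t := by
          simp [pvStepScan]
        rw [step, ih true cells (cur ++ ['\\'])]
        have hq : pvScan false ('\\' :: t) = pvConsHead ['\\'] (pvScan true t) := by simp [pvScan]
        rw [hq, pvConsHead_consHead]
      · by_cases hp : c = '|'
        · subst hp
          have step : List.foldl pvStepScan (cells, cur, false) ('|' :: t)
              = List.foldl pvStepScan (cells ++ [String.ofList cur], [], false) t := by
            simp [pvStepScan, hc]
          rw [step, ih false (cells ++ [String.ofList cur]) []]
          have hq : pvScan false ('|' :: t) = [] :: pvScan false t := by simp [pvScan, hc]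
          rw [hq]
          cases hs : pvScan false t with
          | nil => exact absurd hs (pvScan_ne_nil false t)
          | cons h r => simp [pvConsHead]
        · have step : List.foldl pvStepScan (cells, cur, false) (c :: t)
              = List.foldl pvStepScan (cells, cur ++ [c], false) t := by
            simp [pvStepScan, hc, hp]
          rw [step, ih false cells (cur ++ [c])]
          have hq : pvScan false (c :: t) = pvConsHead [c] (pvScan false t) := by
            simp [pvScan, hc, hp]
          rw [hq, pvConsHead_consHead]

theorem dec_foldl (cs : List Char) : ∀ (pend : Bool) (buf : List Char),
    (if (cs.foldl pvStepDec (buf, pend)).2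
     then (cs.foldl pvStepDec (buf, pend)).1 ++ ['\\']
     else (cs.foldl pvStepDec (buf, pend)).1)
    = buf ++ pvDec pend cs := by
  induction cs with
  | nil =>
    intro pend buf
    cases pend <;> simp [pvDec]
  | cons c t ih =>
    intro pend buf
    cases pend with
    | true =>
      by_cases hc : c = '\\' ∨ c = '|'
      · have step : List.foldl pvStepDec (buf, true) (c :: t)
            = List.foldl pvStepDec (buf ++ [c], false) t := by
          simp [pvStepDec, hc]
        rw [step, ih false (buf ++ [c])]
        simp [pvDec, hc]
      · by_cases hn : c = 'n'
        · subst hn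
          have step : List.foldl pvStepDec (buf, true) ('n' :: t)
              = List.foldl pvStepDec (buf ++ ['\n'], false) t := by
            simp [pvStepDec, hc]
          rw [step, ih false (buf ++ ['\n'])]
          simp [pvDec, hc]
        · have step : List.foldl pvStepDec (buf, true) (c :: t)
              = List.foldl pvStepDec (buf ++ ['\\', c], false) t := by
            simp [pvStepDec, hc, hn]
          rw [step, ih false (buf ++ ['\\', c])]
          simp [pvDec, hc, hn]
    | false =>
      by_cases hc : c = '\\'
      · subst hc
        have step : List.foldl pvStepDec (buf, false) ('\\' :: t)
            = List.foldl pvStepDec (buf, true) t := by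
          simp [pvStepDec]
        rw [step, ih true buf]
        simp [pvDec]
      · have step : List.foldl pvStepDec (buf, false) (c :: t)
            = List.foldl pvStepDec (buf ++ [c], false) t := by
          simp [pvStepDec, hc]
        rw [step, ih false (buf ++ [c])]
        simp [pvDec, hc]

-- A's cell loop builds the map of its per-cell pipeline
theorem A_cells (parts : List String) : ∀ (init : List String),
    parts.foldl (fun cells p =>
      let p := PySem.Str.strip p
      let p := PySem.Str.replace p "\x00" "|"
      let p := PySem.Str.replace p "\\n" "\n"
      let p := PySem.Str.replace p "\x01" "\\"
      cells ++ [p]) init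
    = init ++ parts.map (fun p =>
        PySem.Str.replace (PySem.Str.replace (PySem.Str.replace (PySem.Str.strip p) "\x00" "|") "\\n" "\n") "\x01" "\\") := by
  induction parts with
  | nil => intro init; simp
  | cons p ps ih => intro init; simp only [List.foldl_cons, List.map_cons]; rw [ih]; simp

-- B's out loop builds the map of its per-cell decode
theorem B_cells (cells : List String) : ∀ (init : List String),
    cells.foldl (fun out cell =>
      let r := (PySem.Str.strip cell).toList.foldl pvStepDec ([], false)
      let buf := if r.2 then r.1 ++ ['\\'] else r.1
      out ++ [String.ofList buf]) init
    = init ++ cells.map (fun cell => String.ofList (pvDec false (PySem.Str.strip cell).toList)) := by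
  induction cells with
  | nil => intro init; simp
  | cons cl cls ih =>
    intro init
    simp only [List.foldl_cons, List.map_cons]
    rw [ih]
    have hd := dec_foldl (PySem.Str.strip cl).toList false []
    simp only [List.nil_append] at hd
    simp only [PySem.Str.toList_strip] at hd ⊢
    simp [hd]

-- === membership / domain plumbing ===
theorem mem_consHead_single {q : List Char} {x : Char} {L : List (List Char)}
    (hL : L ≠ []) (hq : q ∈ pvConsHead [x] L) :
    q ∈ L ∨ ∃ h, h ∈ L ∧ q = x :: h := by
  cases L with
  | nil => exact absurd rfl hL
  | cons h r =>
    simp only [pvConsHead, List.mem_cons] at hq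
    rcases hq with hq | hq
    · right; exact ⟨h, List.mem_cons_self .., by simpa using hq⟩
    · left; exact List.mem_cons_of_mem _ hq

theorem mem_pvScan (cs : List Char) : ∀ (b : Bool) (q : List Char), q ∈ pvScan b cs → ∀ c ∈ q, c ∈ cs := by
  induction cs with
  | nil =>
    intro b q hq c hc
    cases b <;> simp [pvScan] at hq <;> subst hq <;> simp at hc
  | cons hd t ih =>
    have single : ∀ (b' : Bool) (q : List Char), q ∈ pvConsHead [hd] (pvScan b' t) →
        ∀ c ∈ q, c ∈ hd :: t := by
      intro b' q hq c hc
      rcases mem_consHead_single (pvScan_ne_nil b' t) hq with hq | ⟨h, hh, rfl⟩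
      · exact List.mem_cons_of_mem _ (ih b' q hq c hc)
      · rcases List.mem_cons.mp hc with hc | hc
        · exact hc ▸ List.mem_cons_self ..
        · exact List.mem_cons_of_mem _ (ih b' h hh c hc)
    intro b q hq c hc
    cases b with
    | true =>
      have hq' : q ∈ pvConsHead [hd] (pvScan false t) := by simpa [pvScan] using hq
      exact single false q hq' c hc
    | false =>
      by_cases hc' : hd = '\\'
      · subst hc'
        have hq' : q ∈ pvConsHead ['\\'] (pvScan true t) := by simpa [pvScan] using hq
        exact single true q hq' c hc
      · by_cases hp : hd = '|'
        · subst hp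
          have hq' : q ∈ ([] : List Char) :: pvScan false t := by simpa [pvScan, hc'] using hq
          rcases List.mem_cons.mp hq' with hq' | hq'
          · subst hq'; simp at hc
          · exact List.mem_cons_of_mem _ (ih false q hq' c hc)
        · have hq' : q ∈ pvConsHead [hd] (pvScan false t) := by simpa [pvScan, hc', hp] using hq
          exact single false q hq' c hc

theorem mem_strip {c : Char} {q : List Char} (h : c ∈ PySem.Chars.strip q) : c ∈ q := by
  unfold PySem.Chars.strip PySem.Chars.rstrip PySem.Chars.lstrip at h
  have h1 := (List.dropWhile_sublist (l := (List.dropWhile PySem.Chars.isspace q).reverse) PySem.Chars.isspace).mem (by simpa using h)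
  have h2 : c ∈ List.dropWhile PySem.Chars.isspace q := by simpa using h1
  exact (List.dropWhile_sublist PySem.Chars.isspace).mem h2

theorem dom_chain (line : String) (hdom : Dom_split_pipe_row_py line) :
    ∀ c ∈ line.toList, c ≠ '\x00' ∧ c ≠ '\x01' := by
  intro c hc
  unfold Dom_split_pipe_row_py pvDomStr at hdom
  rw [List.all_eq_true] at hdom
  have hb := hdom c hc
  unfold pvDomChar at hb
  constructor <;> intro he <;> subst he <;> simp at hb

theorem step_startswith (s : String) (P : Char → Prop) (h : ∀ c ∈ s.toList, P c) :
    ∀ c ∈ (if PySem.Str.startswith s "|" then PySem.Str.slice s (some 1) none else s).toList, P c := by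
  split
  · intro c hc
    rw [PySem.Str.toList_slice, PySem.Chars.slice_eq_listSlice,
      PySem.List.slice_from _ (by norm_num : (0:Int) ≤ 1)] at hc
    exact h c ((List.drop_sublist _ _).mem hc)
  · exact h

theorem step_endswith (s : String) (P : Char → Prop) (h : ∀ c ∈ s.toList, P c) :
    ∀ c ∈ (if PySem.Str.endswith s "|" then PySem.Str.slice s none (some (-1)) else s).toList, P c := by
  split
  · intro c hc
    rw [PySem.Str.slice_to_neg_one] at hc
    exact h c ((List.dropLast_sublist _).mem hc)
  · exact h

theorem h2_chain (line : String) (hdom : Dom_split_pipe_row_py line) :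
    ∀ c ∈ (if PySem.Str.endswith
              (if PySem.Str.startswith (PySem.Str.strip line) "|"
               then PySem.Str.slice (PySem.Str.strip line) (some 1) none
               else PySem.Str.strip line) "|"
           then PySem.Str.slice
              (if PySem.Str.startswith (PySem.Str.strip line) "|"
               then PySem.Str.slice (PySem.Str.strip line) (some 1) none
               else PySem.Str.strip line) none (some (-1))
           else (if PySem.Str.startswith (PySem.Str.strip line) "|"
               then PySem.Str.slice (PySem.Str.strip line) (some 1) none
               else PySem.Str.strip line)).toList,
      c ≠ '\x00' ∧ c ≠ '\x01' := by
  have h0 : ∀ c ∈ (PySem.Str.strip line).toList, c ≠ '\x00' ∧ c ≠ '\x01' := by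
    intro c hc
    rw [PySem.Str.toList_strip] at hc
    exact dom_chain line hdom c (mem_strip hc)
  exact step_endswith _ _ (step_startswith _ _ h0)

-- === the shared tail: the two pipelines agree on any pipe-trimmed inner string ===
theorem map_toList_inj {l1 l2 : List String} (h : l1.map String.toList = l2.map String.toList) :
    l1 = l2 := by
  induction l1 generalizing l2 with
  | nil => cases l2 <;> simp_all
  | cons a t ih =>
    cases l2 with
    | nil => simp_all
    | cons b r =>
      simp only [List.map_cons, List.cons.injEq] at h
      exact by rw [String.toList_injective h.1, ih h.2]

theorem tails_eq (inn : String) (h : ∀ c ∈ inn.toList, c ≠ '\x00' ∧ c ≠ '\x01') :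
    (let inner := PySem.Str.replace inn "\\\\" "\x01"
     let inner := PySem.Str.replace inner "\\|" "\x00"
     let parts := (PySem.Str.split? inner "|").getD []
     parts.foldl (fun cells p =>
       let p := PySem.Str.strip p
       let p := PySem.Str.replace p "\x00" "|"
       let p := PySem.Str.replace p "\\n" "\n"
       let p := PySem.Str.replace p "\x01" "\\"
       cells ++ [p]) [])
    =
    (let st := inn.toList.foldl pvStepScan ([], [], false)
     let cells := st.1 ++ [String.ofList st.2.1]
     cells.foldl (fun out cell =>
       let r := (PySem.Str.strip cell).toList.foldl pvStepDec ([], false)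
       let buf := if r.2 then r.1 ++ ['\\'] else r.1
       out ++ [String.ofList buf]) []) := by
  have l1 : ("\\\\" : String).toList = ['\\', '\\'] := by decide
  have l2 : ("\x01" : String).toList = ['\x01'] := by decide
  have l3 : ("\\|" : String).toList = ['\\', '|'] := by decide
  have l4 : ("\x00" : String).toList = ['\x00'] := by decide
  have l5 : ("|" : String).toList = ['|'] := by decide
  have l6 : ("\\n" : String).toList = ['\\', 'n'] := by decide
  have l7 : ("\n" : String).toList = ['\n'] := by decide
  have l8 : ("\\" : String).toList = ['\\'] := by decide
  have hinner2c : (PySem.Str.replace (PySem.Str.replace inn "\\\\" "\x01") "\\|" "\x00").toList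
      = pvEnc false inn.toList := by
    simp only [PySem.Str.toList_replace, l1, l2, l3, l4]
    rw [replace_eq_pvRepl _ _ _ (by simp), replace_eq_pvRepl _ _ _ (by simp),
      (L1a inn.toList).1, (L1b inn.toList).1]
  obtain ⟨ps, hps, hmap⟩ : ∃ ps, PySem.Str.split? (PySem.Str.replace (PySem.Str.replace inn "\\\\" "\x01") "\\|" "\x00") "|" = some ps ∧
      ps.map String.toList = PySem.Chars.splitOn (PySem.Str.replace (PySem.Str.replace inn "\\\\" "\x01") "\\|" "\x00").toList ['|'] := by
    have hb := PySem.Str.split?_map (PySem.Str.replace (PySem.Str.replace inn "\\\\" "\x01") "\\|" "\x00") "|"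
    cases hsp : PySem.Str.split? (PySem.Str.replace (PySem.Str.replace inn "\\\\" "\x01") "\\|" "\x00") "|" with
    | none => rw [hsp] at hb; simp [PySem.Chars.split?, l5] at hb
    | some ps =>
      rw [hsp] at hb
      refine ⟨ps, rfl, ?_⟩
      simpa [PySem.Chars.split?, l5] using hb
  show ((PySem.Str.split? (PySem.Str.replace (PySem.Str.replace inn "\\\\" "\x01") "\\|" "\x00") "|").getD []).foldl _ [] = _
  rw [hps]
  show ps.foldl _ [] = _
  rw [A_cells, B_cells, scan_foldl inn.toList false [] []]
  have hch : pvConsHead [] (pvScan false inn.toList) = pvScan false inn.toList := by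
    cases hs : pvScan false inn.toList with
    | nil => exact absurd hs (pvScan_ne_nil _ _)
    | cons hh r => simp [pvConsHead]
  rw [hch]
  simp only [List.nil_append]
  apply map_toList_inj
  rw [List.map_map, List.map_map, List.map_map]
  -- the A-side per-cell pipeline, moved to the Chars level
  have hFA : ∀ p : String,
      (String.toList ∘ fun p =>
        PySem.Str.replace (PySem.Str.replace (PySem.Str.replace (PySem.Str.strip p) "\x00" "|") "\\n" "\n") "\x01" "\\") p
      = PySem.Chars.replace (PySem.Chars.replace (PySem.Chars.replace (PySem.Chars.strip p.toList) ['\x00'] ['|']) ['\\', 'n'] ['\n']) ['\x01'] ['\\'] := by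
    intro p
    simp only [Function.comp_apply, PySem.Str.toList_replace, PySem.Str.toList_strip, l2, l4, l5, l6, l7, l8]
  calc ps.map (String.toList ∘ fun p =>
        PySem.Str.replace (PySem.Str.replace (PySem.Str.replace (PySem.Str.strip p) "\x00" "|") "\\n" "\n") "\x01" "\\")
      = ps.map (fun p => PySem.Chars.replace (PySem.Chars.replace (PySem.Chars.replace (PySem.Chars.strip p.toList) ['\x00'] ['|']) ['\\', 'n'] ['\n']) ['\x01'] ['\\']) :=
        List.map_congr_left (fun p _ => hFA p)
    _ = (ps.map String.toList).map (fun q => PySem.Chars.replace (PySem.Chars.replace (PySem.Chars.replace (PySem.Chars.strip q) ['\x00'] ['|']) ['\\', 'n'] ['\n']) ['\x01'] ['\\']) := by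
        rw [List.map_map]; rfl
    _ = ((pvScan false inn.toList).map (pvEnc false)).map (fun q => PySem.Chars.replace (PySem.Chars.replace (PySem.Chars.replace (PySem.Chars.strip q) ['\x00'] ['|']) ['\\', 'n'] ['\n']) ['\x01'] ['\\']) := by
        rw [hmap, hinner2c, splitOn_eq_pvSplitSp, (L2 inn.toList).1]
    _ = (pvScan false inn.toList).map (fun q => PySem.Chars.replace (PySem.Chars.replace (PySem.Chars.replace (PySem.Chars.strip (pvEnc false q)) ['\x00'] ['|']) ['\\', 'n'] ['\n']) ['\x01'] ['\\']) := by
        rw [List.map_map]; rfl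
    _ = (pvScan false inn.toList).map (fun q => pvDec false (PySem.Chars.strip q)) := by
        apply List.map_congr_left
        intro q hq
        have hsub : ∀ c ∈ PySem.Chars.strip q, c ∈ inn.toList :=
          fun c hc => mem_pvScan inn.toList false q hq c (mem_strip hc)
        have hq0 : '\x00' ∉ PySem.Chars.strip q := fun hm => ((h _ (hsub _ hm)).1 rfl)
        have hq1 : '\x01' ∉ PySem.Chars.strip q := fun hm => ((h _ (hsub _ hm)).2 rfl)
        rw [replace_eq_pvRepl _ _ _ (by simp), replace_eq_pvRepl _ _ _ (by simp),
          replace_eq_pvRepl _ _ _ (by simp), strip_enc]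
        have hL4 := (L4 (PySem.Chars.strip q) hq0 hq1).1
        simpa [pvDecA] using hL4
    _ = (pvScan false inn.toList).map (String.toList ∘
          ((fun cell => String.ofList (pvDec false (PySem.Str.strip cell).toList)) ∘ String.ofList)) := by
        apply List.map_congr_left
        intro q _
        simp [PySem.Str.toList_strip]

set_option maxHeartbeats 1000000 in
theorem split_pipe_row_py_spec : Claim_equal_split_pipe_row_py := by
  intro line hdom
  unfold Spec_split_pipe_row_py split_pipe_row_py split_pipe_row_py_alt
  have e1 : (fun (s : List String × List Char × Bool) ch =>
      if s.2.2 then (s.1, s.2.1 ++ [ch], false)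
      else if ch = '\\' then (s.1, s.2.1 ++ [ch], true)
      else if ch = '|' then (s.1 ++ [String.ofList s.2.1], [], false)
      else (s.1, s.2.1 ++ [ch], false)) = pvStepScan := rfl
  have e2 : (fun (s : List Char × Bool) ch =>
      if s.2 then
        (if ch = '\\' ∨ ch = '|' then s.1 ++ [ch]
         else if ch = 'n' then s.1 ++ ['\n']
         else s.1 ++ ['\\', ch], false)
      else if ch = '\\' then (s.1, true)
      else (s.1 ++ [ch], false)) = pvStepDec := rfl
  rw [e1, e2]
  exact tails_eq _ (h2_chain line hdom)
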